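-- pv_equiv track=rewrite | github.com/wamonite/advent-of-code-2020 | day16.py | get_field_name_options
-- ===== SOURCE A (Python) =====
-- def get_field_name_options(field_lookup, ticket_list):
--     """
--     For each value, find a set of valid field names
--     """
--
--     field_name_set = set(field_lookup.keys())
--     field_name_options_list = []
--     for field_idx in range(len(field_name_set)):
--         current_set = set(field_name_set)
--         for ticket in ticket_list:
--             field_value = ticket[field_idx]
--             for field_name in field_name_set:
--                 min1, max1, min2, max2 = field_lookup[field_name]
--                 if not(min1 <= field_value <= max1 or min2 <= field_value <= max2):
--                     current_set.discard(field_name)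
--
--         field_name_options_list.append(current_set)
--
--     return field_name_options_list
-- ===== SOURCE B (Python) =====
-- def _bisect_left(a, x):
--     lo, hi = 0, len(a)
--     while lo < hi:
--         mid = (lo + hi) // 2
--         if a[mid] < x:
--             lo = mid + 1
--         else:
--             hi = mid
--     return lo
--
--
-- def _bisect_right(a, x):
--     lo, hi = 0, len(a)
--     while lo < hi:
--         mid = (lo + hi) // 2
--         if x < a[mid]:
--             hi = mid
--         else:
--             lo = mid + 1
--     return lo
--
--
-- def get_field_name_options(field_lookup, ticket_list):
--     """
--     For each value, find a set of valid field names
--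
--     Per position: sort the column of ticket values once, then count by binary
--     search how many values each field's two ranges cover (inclusion-exclusion
--     on the overlap); the field is an option iff the count equals the number of
--     tickets.
--     """
--     total = len(ticket_list)
--     items = list(field_lookup.items())
--     field_name_options_list = []
--     for field_idx in range(len(items)):
--         column = sorted(ticket[field_idx] for ticket in ticket_list)
--         options = set()
--         for field_name, (min1, max1, min2, max2) in items:
--             in1 = max(0, _bisect_right(column, max1) - _bisect_left(column, min1))
--             in2 = max(0, _bisect_right(column, max2) - _bisect_left(column, min2))
--             both = max(0, _bisect_right(column, min(max1, max2)) - _bisect_left(column, max(min1, min2)))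
--             if in1 + in2 - both == total:
--                 options.add(field_name)
--         field_name_options_list.append(options)
--     return field_name_options_list
-- ===== Notes on version B (the rewrite author's own statement) =====
-- stated objective: alternative
-- what changed: B sorts each position's column of ticket values once and decides each field by four binary searches with inclusion-exclusion on the two ranges' overlap (count covered == number of tickets), instead of A's triple loop that tests every ticket value against every field name and discards.
-- outside the precondition, e.g. on get_field_name_options({'b0': (5, 54, 9)}, []): A returns [{'b0'}], B raises ValueError
import Mathlib
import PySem

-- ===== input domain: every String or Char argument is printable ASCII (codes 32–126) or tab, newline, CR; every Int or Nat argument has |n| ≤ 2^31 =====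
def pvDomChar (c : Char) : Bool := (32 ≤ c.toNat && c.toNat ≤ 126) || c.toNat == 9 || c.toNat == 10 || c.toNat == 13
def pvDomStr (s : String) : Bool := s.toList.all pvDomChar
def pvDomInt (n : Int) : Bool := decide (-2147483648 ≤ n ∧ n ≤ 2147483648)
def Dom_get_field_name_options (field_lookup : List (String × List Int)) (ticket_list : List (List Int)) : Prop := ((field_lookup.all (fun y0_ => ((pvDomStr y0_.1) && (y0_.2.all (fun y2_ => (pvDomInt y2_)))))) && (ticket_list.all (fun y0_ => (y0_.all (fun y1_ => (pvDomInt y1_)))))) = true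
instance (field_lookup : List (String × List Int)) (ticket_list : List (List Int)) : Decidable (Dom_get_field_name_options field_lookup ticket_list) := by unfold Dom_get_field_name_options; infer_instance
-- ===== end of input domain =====

-- B sorts each position's column of ticket values once and decides each field name by four
-- binary searches (inclusion-exclusion on the two ranges' overlap: covered count == ticket count)
-- instead of A's triple loop testing every ticket value against every field name (objective: alternative).

-- ===== PORT A =====
-- literal port of A: per index, copy the name set and discard names whose ranges miss some ticket value
def get_field_name_options (field_lookup : List (String × List Int)) (ticket_list : List (List Int)) : List (List String) :=
  let fl := PySem.Dict.mk field_lookup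
  let field_name_set : PySem.Set String := PySem.Set.ofList fl.keys
  (PySem.List.pyRange 0 (field_name_set.length : Int) 1).foldl (fun acc field_idx =>
    let current_set :=
      ticket_list.foldl (fun cur ticket =>
        -- ticket[field_idx]: none = IndexError (excluded by Pre_); the default 0 is never used there
        let field_value := (PySem.List.pyGet? ticket field_idx).getD 0
        field_name_set.foldl (fun cs field_name =>
          -- unpack of field_lookup[field_name]: a non-4 list = ValueError (excluded by Pre_)
          match fl.getD field_name [] with
          | [min1, max1, min2, max2] =>
            if !((min1 ≤ field_value && field_value ≤ max1) || (min2 ≤ field_value && field_value ≤ max2)) then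
              PySem.Set.discard cs field_name
            else cs
          | _ => cs) cur)
        (PySem.Set.ofList field_name_set)
    acc ++ [current_set]) []

-- ===== PORT B =====
-- literal port of B: per index, sort the column of ticket values, then keep each field name iff
-- the number of column values its two ranges cover (four binary searches, inclusion-exclusion
-- on the overlap interval) equals the number of tickets.
-- _bisect_left/_bisect_right in Source B are the stdlib while-loop binary search, ported as
-- PySem.List.bisectLeft / bisectRight (the identical lo/hi halving loop).
def get_field_name_options_alt (field_lookup : List (String × List Int)) (ticket_list : List (List Int)) : List (List String) :=
  let total : Int := (ticket_list.length : Int)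
  let items := (PySem.Dict.mk field_lookup).items
  (PySem.List.pyRange 0 (items.length : Int) 1).foldl (fun acc field_idx =>
    -- ticket[field_idx]: none = IndexError (excluded by Pre_); the default 0 is never used there
    let column := PySem.List.sorted (ticket_list.map (fun ticket => (PySem.List.pyGet? ticket field_idx).getD 0)) (fun v => v) false
    let options : PySem.Set String :=
      items.foldl (fun opts p =>
        -- unpack 'field_name, (min1, max1, min2, max2)': exact for a 4-element list, positional
        -- components; a list of any other length = ValueError (excluded by Pre_)
        if p.2.length = 4 then
          let min1 := p.2[0]!
          let max1 := p.2[1]!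
          let min2 := p.2[2]!
          let max2 := p.2[3]!
          let in1 : Int := max 0 ((PySem.List.bisectRight column max1 : Int) - (PySem.List.bisectLeft column min1 : Int))
          let in2 : Int := max 0 ((PySem.List.bisectRight column max2 : Int) - (PySem.List.bisectLeft column min2 : Int))
          let both : Int := max 0 ((PySem.List.bisectRight column (min max1 max2) : Int) - (PySem.List.bisectLeft column (max min1 min2) : Int))
          if in1 + in2 - both == total then PySem.Set.add opts p.1 else opts
        else opts) PySem.Set.empty
    acc ++ [options]) []

-- ===== PRECONDITION & SPEC =====
-- Pre_ excludes: assoc lists with duplicate keys (a Python dict argument cannot carry them);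
-- range lists whose length is not 4 (A's 4-way unpack raises ValueError); tickets shorter
-- than the number of fields (A's ticket[field_idx] raises IndexError).
def Pre_get_field_name_options (field_lookup : List (String × List Int)) (ticket_list : List (List Int)) : Prop :=
  (field_lookup.map Prod.fst).Nodup ∧
  (∀ p ∈ field_lookup, p.2.length = 4) ∧
  (∀ t ∈ ticket_list, field_lookup.length ≤ t.length)
instance (field_lookup : List (String × List Int)) (ticket_list : List (List Int)) : Decidable (Pre_get_field_name_options field_lookup ticket_list) := by unfold Pre_get_field_name_options; infer_instance

def pvWitness_get_field_name_options : (List (String × List Int)) × List (List Int) :=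
  ([("row", [0, 3, 5, 7]), ("seat", [1, 2, 8, 9])], [[2, 8], [6, 1]])

def Spec_get_field_name_options (field_lookup : List (String × List Int)) (ticket_list : List (List Int)) (out : List (List String)) : Prop := out = get_field_name_options_alt field_lookup ticket_list
instance (field_lookup : List (String × List Int)) (ticket_list : List (List Int)) (out : List (List String)) : Decidable (Spec_get_field_name_options field_lookup ticket_list out) := by unfold Spec_get_field_name_options; infer_instance

-- ===== CLAIM (what is proved, stated in full; the proofs are below) =====
def Claim_equal_get_field_name_options : Prop := ∀ (field_lookup : List (String × List Int)) (ticket_list : List (List Int)), Dom_get_field_name_options field_lookup ticket_list → Pre_get_field_name_options field_lookup ticket_list → Spec_get_field_name_options field_lookup ticket_list (get_field_name_options field_lookup ticket_list)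

-- ===== LEMMAS AND PROOFS =====

-- A's per-name keep-test, factored out for the proofs: does the name's range pair miss value v?
def keepTest (fl : List (String × List Int)) (v : Int) (nm : String) : Bool :=
  match (PySem.Dict.mk fl).getD nm [] with
  | [min1, max1, min2, max2] => !((min1 ≤ v && v ≤ max1) || (min2 ≤ v && v ≤ max2))
  | _ => false

-- B's per-item keep-test, factored out for the proofs (false on a non-4 range list)
def bTest (column : List Int) (total : Int) (p : String × List Int) : Bool :=
  match p.2 with
  | [min1, max1, min2, max2] =>
      max 0 ((PySem.List.bisectRight column max1 : Int) - (PySem.List.bisectLeft column min1 : Int)) +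
      max 0 ((PySem.List.bisectRight column max2 : Int) - (PySem.List.bisectLeft column min2 : Int)) -
      max 0 ((PySem.List.bisectRight column (min max1 max2) : Int) - (PySem.List.bisectLeft column (max min1 min2) : Int)) == total
  | _ => false

-- the discard loop over N removes from cur exactly the members of N that test bad
lemma foldl_discard_eq_filter (bad : String → Bool) :
    ∀ (N cur : List String),
      N.foldl (fun cs nm => if bad nm then PySem.Set.discard cs nm else cs) cur
        = cur.filter (fun x => !(decide (x ∈ N) && bad x))
  | [], cur => by simp
  | n :: N, cur => by
    rw [List.foldl_cons, foldl_discard_eq_filter bad N]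
    by_cases hb : bad n = true
    · simp only [hb, if_true, PySem.Set.discard, List.filter_filter]
      apply List.filter_congr
      intro x _
      by_cases hx : x = n
      · subst hx; simp [hb]
      · simp [hx]
    · simp only [Bool.not_eq_true] at hb
      simp only [hb, Bool.false_eq_true, if_false]
      apply List.filter_congr
      intro x _
      by_cases hx : x = n
      · subst hx; simp [hb]
      · simp [hx]

-- folding the per-ticket discard loop starting from a filter of names is a filter of names
lemma foldl_tickets_eq_filter (names : List String) (bad : Int → String → Bool)
    (fv : List Int → Int) :
    ∀ (ts : List (List Int)) (P : String → Bool),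
      ts.foldl (fun cur t =>
          names.foldl (fun cs nm => if bad (fv t) nm then PySem.Set.discard cs nm else cs) cur)
        (names.filter P)
        = names.filter (fun x => P x && ts.all (fun t => !bad (fv t) x))
  | [], P => by simp
  | t :: ts, P => by
    rw [List.foldl_cons, foldl_discard_eq_filter (bad (fv t)) names (names.filter P),
        List.filter_filter, foldl_tickets_eq_filter names bad fv ts]
    apply List.filter_congr
    intro x hx
    simp [hx, Bool.and_comm, Bool.and_assoc]

-- the ticket loop started from the full name list
lemma foldl_tickets_from_names (names : List String) (bad : Int → String → Bool)
    (fv : List Int → Int) (ts : List (List Int)) :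
    ts.foldl (fun cur t =>
        names.foldl (fun cs nm => if bad (fv t) nm then PySem.Set.discard cs nm else cs) cur)
      names
      = names.filter (fun x => ts.all (fun t => !bad (fv t) x)) := by
  have h := foldl_tickets_eq_filter names bad fv ts (fun _ => true)
  simpa using h

-- B's conditional set.add loop over items with fresh, pairwise-distinct names is a filter
lemma foldl_add_eq_filter_map (test : String × List Int → Bool) :
    ∀ (l : List (String × List Int)) (acc : List String),
      (l.map Prod.fst).Nodup → (∀ p ∈ l, p.1 ∉ acc) →
      l.foldl (fun s p => if test p then PySem.Set.add s p.1 else s) acc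
        = acc ++ (l.filter test).map Prod.fst
  | [], acc, _, _ => by simp
  | p :: l, acc, hnd, hfresh => by
    rw [List.map_cons] at hnd
    obtain ⟨hp1, hnd'⟩ := List.nodup_cons.1 hnd
    have hp : p.1 ∉ acc := hfresh p List.mem_cons_self
    by_cases ht : test p = true
    · have hadd : PySem.Set.add acc p.1 = acc ++ [p.1] := by
        simp [PySem.Set.add, PySem.Set.contains, hp]
      rw [List.foldl_cons]
      simp only [ht, if_true, hadd]
      rw [foldl_add_eq_filter_map test l (acc ++ [p.1]) hnd' ?_]
      · simp [ht]
      · intro q hq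
        have hqp : q.1 ≠ p.1 := by
          intro h; exact hp1 (h ▸ List.mem_map_of_mem hq)
        simp [hfresh q (List.mem_cons_of_mem p hq), hqp]
    · simp only [Bool.not_eq_true] at ht
      rw [List.foldl_cons]
      simp only [ht, Bool.false_eq_true, if_false]
      rw [foldl_add_eq_filter_map test l acc hnd'
          (fun q hq => hfresh q (List.mem_cons_of_mem p hq))]
      simp [ht]

-- the fst-projection of a pair filter is a filter of the fst-projections
lemma map_fst_filter_eq_filter_map_fst {ν : Type} (F : String × ν → Bool) (G : String → Bool) :
    ∀ (l : List (String × ν)), (∀ p ∈ l, G p.1 = F p) →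
      (l.filter F).map Prod.fst = (l.map Prod.fst).filter G
  | [], _ => rfl
  | p :: l, h => by
    have hrest := map_fst_filter_eq_filter_map_fst F G l (fun q hq => h q (List.mem_cons_of_mem p hq))
    have hp := h p (List.mem_cons_self)
    by_cases hF : F p = true
    · simp [hF, hp ▸ hF, hrest]
    · simp only [Bool.not_eq_true] at hF
      simp [hF, hp ▸ hF, hrest]

-- bisect_left on a non-decreasing list counts the elements < x
lemma bisectLeft_eq_countP (col : List Int) (x : Int) (hs : col.Pairwise (· ≤ ·)) :
    PySem.List.bisectLeft col x = col.countP (fun v => decide (v < x)) := by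
  obtain ⟨hle, hlt, hge⟩ := PySem.List.bisectLeft_spec col x hs
  set r := PySem.List.bisectLeft col x with hr
  have htake : (col.take r).countP (fun v => decide (v < x)) = r := by
    have hlen : (col.take r).length = r := by
      rw [List.length_take]; omega
    rw [List.countP_eq_length.2, hlen]
    intro v hv
    obtain ⟨i, hi, hvi⟩ := List.mem_iff_getElem.1 hv
    have hi' : i < r := by rw [hlen] at hi; exact hi
    have hic : i < col.length := lt_of_lt_of_le hi' hle
    have := hlt i hic hi'
    rw [List.getElem_take] at hvi
    subst hvi
    simpa using this
  have hdrop : (col.drop r).countP (fun v => decide (v < x)) = 0 := by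
    rw [List.countP_eq_zero]
    intro v hv
    obtain ⟨i, hi, hvi⟩ := List.mem_iff_getElem.1 hv
    have hic : r + i < col.length := by rw [List.length_drop] at hi; omega
    have := hge (r + i) hic (by omega)
    rw [List.getElem_drop] at hvi
    subst hvi
    simpa using not_lt.2 this
  calc r = (col.take r).countP (fun v => decide (v < x)) + (col.drop r).countP (fun v => decide (v < x)) := by
          rw [htake, hdrop]; omega
    _ = col.countP (fun v => decide (v < x)) := by rw [← List.countP_append, List.take_append_drop]

-- bisect_right on a non-decreasing list counts the elements ≤ x
lemma bisectRight_eq_countP (col : List Int) (x : Int) (hs : col.Pairwise (· ≤ ·)) :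
    PySem.List.bisectRight col x = col.countP (fun v => decide (v ≤ x)) := by
  obtain ⟨hle, hlt, hge⟩ := PySem.List.bisectRight_spec col x hs
  set r := PySem.List.bisectRight col x with hr
  have htake : (col.take r).countP (fun v => decide (v ≤ x)) = r := by
    have hlen : (col.take r).length = r := by
      rw [List.length_take]; omega
    rw [List.countP_eq_length.2, hlen]
    intro v hv
    obtain ⟨i, hi, hvi⟩ := List.mem_iff_getElem.1 hv
    have hi' : i < r := by rw [hlen] at hi; exact hi
    have hic : i < col.length := lt_of_lt_of_le hi' hle
    have := hlt i hic hi'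
    rw [List.getElem_take] at hvi
    subst hvi
    simpa using this
  have hdrop : (col.drop r).countP (fun v => decide (v ≤ x)) = 0 := by
    rw [List.countP_eq_zero]
    intro v hv
    obtain ⟨i, hi, hvi⟩ := List.mem_iff_getElem.1 hv
    have hic : r + i < col.length := by rw [List.length_drop] at hi; omega
    have := hge (r + i) hic (by omega)
    rw [List.getElem_drop] at hvi
    subst hvi
    simpa using not_le.2 this
  calc r = (col.take r).countP (fun v => decide (v ≤ x)) + (col.drop r).countP (fun v => decide (v ≤ x)) := by
          rw [htake, hdrop]; omega
    _ = col.countP (fun v => decide (v ≤ x)) := by rw [← List.countP_append, List.take_append_drop]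

-- counting split: counting ≤ b splits at a when a ≤ b
lemma countP_le_split (a b : Int) (h : a ≤ b) :
    ∀ l : List Int,
      l.countP (fun v => decide (v ≤ b))
        = l.countP (fun v => decide (v < a)) + l.countP (fun v => decide (a ≤ v) && decide (v ≤ b))
  | [] => by simp
  | v :: l => by
    have ih := countP_le_split a b h l
    simp only [List.countP_cons, ih]
    by_cases h1 : v < a <;> by_cases h2 : v ≤ b <;>
      simp [h1, h2, show (a ≤ v) ↔ ¬(v < a) by omega] <;> omega

-- the clamped bisect difference counts the interval [a, b]
lemma clamp_count (a b : Int) (l : List Int) :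
    max 0 ((l.countP (fun v => decide (v ≤ b)) : Int) - (l.countP (fun v => decide (v < a)) : Int))
      = (l.countP (fun v => decide (a ≤ v) && decide (v ≤ b)) : Int) := by
  by_cases h : a ≤ b
  · rw [countP_le_split a b h l]
    omega
  · have h0 : l.countP (fun v => decide (a ≤ v) && decide (v ≤ b)) = 0 := by
      rw [List.countP_eq_zero]
      intro v _
      simp only [Bool.and_eq_true, decide_eq_true_eq, not_and]
      intro h1 h2
      omega
    have hle : l.countP (fun v => decide (v ≤ b)) ≤ l.countP (fun v => decide (v < a)) :=
      List.countP_mono_left (fun v _ hv => by simp at hv ⊢; omega)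
    rw [h0]
    omega

-- inclusion-exclusion for counts
lemma countP_incl_excl (p q : Int → Bool) :
    ∀ l : List Int,
      (l.countP p : Int) + (l.countP q : Int) - (l.countP (fun v => p v && q v) : Int)
        = (l.countP (fun v => p v || q v) : Int)
  | [] => by simp
  | v :: l => by
    have ih := countP_incl_excl p q l
    simp only [List.countP_cons]
    by_cases h1 : p v = true <;> by_cases h2 : q v = true <;>
      simp [h1, h2] <;> omega

-- the analytic core: "all column values are covered" equals "covered count == ticket count"
lemma keep_eq_count (a b c d : Int) (vs : List Int) :
    vs.all (fun v => (decide (a ≤ v) && decide (v ≤ b)) || (decide (c ≤ v) && decide (v ≤ d)))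
      = (max 0 ((PySem.List.bisectRight (PySem.List.sorted vs (fun v => v) false) b : Int)
               - (PySem.List.bisectLeft (PySem.List.sorted vs (fun v => v) false) a : Int)) +
         max 0 ((PySem.List.bisectRight (PySem.List.sorted vs (fun v => v) false) d : Int)
               - (PySem.List.bisectLeft (PySem.List.sorted vs (fun v => v) false) c : Int)) -
         max 0 ((PySem.List.bisectRight (PySem.List.sorted vs (fun v => v) false) (min b d) : Int)
               - (PySem.List.bisectLeft (PySem.List.sorted vs (fun v => v) false) (max a c) : Int))
         == (vs.length : Int)) := by
  set col := PySem.List.sorted vs (fun v => v) false with hcol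
  have hs : col.Pairwise (· ≤ ·) := PySem.List.sorted_pairwise vs (fun v => v)
  have hperm : col.Perm vs := PySem.List.sorted_perm vs (fun v => v) false
  rw [bisectRight_eq_countP col b hs, bisectLeft_eq_countP col a hs,
      bisectRight_eq_countP col d hs, bisectLeft_eq_countP col c hs,
      bisectRight_eq_countP col (min b d) hs, bisectLeft_eq_countP col (max a c) hs,
      clamp_count a b col, clamp_count c d col, clamp_count (max a c) (min b d) col]
  have hboth : col.countP (fun v => decide (max a c ≤ v) && decide (v ≤ min b d))
      = col.countP (fun v => ((decide (a ≤ v) && decide (v ≤ b)) && (decide (c ≤ v) && decide (v ≤ d)))) := by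
    apply List.countP_congr
    intro v _
    simp only [Bool.and_eq_true, decide_eq_true_eq, le_min_iff, max_le_iff]
    constructor <;> intro h <;> omega
  rw [hboth, countP_incl_excl (fun v => decide (a ≤ v) && decide (v ≤ b)) (fun v => decide (c ≤ v) && decide (v ≤ d)) col]
  have hlen : col.length = vs.length := hperm.length_eq
  rw [Bool.eq_iff_iff, beq_iff_eq]
  have hcount : col.countP (fun v => (decide (a ≤ v) && decide (v ≤ b)) || (decide (c ≤ v) && decide (v ≤ d)))
      = vs.countP (fun v => (decide (a ≤ v) && decide (v ≤ b)) || (decide (c ≤ v) && decide (v ≤ d))) :=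
    hperm.countP_eq _
  rw [hcount]
  have hle : vs.countP (fun v => (decide (a ≤ v) && decide (v ≤ b)) || (decide (c ≤ v) && decide (v ≤ d))) ≤ vs.length :=
    List.countP_le_length
  constructor
  · intro h
    have := List.countP_eq_length.2 (List.all_eq_true.1 h)
    rw [this]
  · intro h
    have : vs.countP (fun v => (decide (a ≤ v) && decide (v ≤ b)) || (decide (c ≤ v) && decide (v ≤ d))) = vs.length := by
      exact_mod_cast h
    exact List.all_eq_true.2 (List.countP_eq_length.1 this)

-- ===== VERDICT (by name: the statement is the Claim_ definition above) =====
theorem get_field_name_options_spec : Claim_equal_get_field_name_options := by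
  intro field_lookup ticket_list _hdom hpre
  obtain ⟨hnd, hlen4, _htick⟩ := hpre
  unfold Spec_get_field_name_options get_field_name_options get_field_name_options_alt
  simp only []
  have hkeys : (PySem.Dict.mk field_lookup).keys = field_lookup.map Prod.fst := rfl
  set names := field_lookup.map Prod.fst with hnames
  have hofl : PySem.Set.ofList names = names := PySem.Set.ofList_eq_self_of_nodup names hnd
  rw [hkeys]
  simp only [hofl]
  have hlen : names.length = field_lookup.length := by simp [hnames]
  rw [hlen, PySem.List.foldl_append_singleton_eq_map, PySem.List.foldl_append_singleton_eq_map,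
      List.nil_append, List.nil_append]
  apply List.map_congr_left
  intro idx _hidx
  -- abbreviations for this position
  set fv : List Int → Int := fun ticket => (PySem.List.pyGet? ticket idx).getD 0 with hfv
  set col0 : List Int := ticket_list.map fv with hcol0
  set column : List Int := PySem.List.sorted col0 (fun v => v) false with hcolumn
  -- A side: rewrite the inner step into keepTest form, then collapse the discard loops to a filter
  have houter : (fun (cur : List String) (ticket : List Int) =>
      List.foldl (fun cs field_name =>
        match (PySem.Dict.mk field_lookup).getD field_name [] with
        | [min1, max1, min2, max2] =>
          if (!((min1 ≤ fv ticket && fv ticket ≤ max1)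
                || (min2 ≤ fv ticket && fv ticket ≤ max2))) = true then
            PySem.Set.discard cs field_name
          else cs
        | _ => cs) cur names)
      = (fun cur ticket =>
          List.foldl (fun cs nm =>
            if keepTest field_lookup (fv ticket) nm = true then
              PySem.Set.discard cs nm
            else cs) cur names) := by
    funext cur ticket
    congr 1
    funext cs nm
    rcases h : (PySem.Dict.mk field_lookup).getD nm [] with _ | ⟨a, _ | ⟨b, _ | ⟨c, _ | ⟨d, _ | t⟩⟩⟩⟩ <;>
      simp [keepTest, h]
  rw [houter, foldl_tickets_from_names names (keepTest field_lookup) fv ticket_list]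
  -- B side: rewrite the conditional add step into bTest form, then collapse the add loop to a filter
  have hbstep : (fun (opts : List String) (p : String × List Int) =>
      if p.2.length = 4 then
        if (max (0 : Int) ((PySem.List.bisectRight column (p.2[1]!) : Int) - (PySem.List.bisectLeft column (p.2[0]!) : Int)) +
            max (0 : Int) ((PySem.List.bisectRight column (p.2[3]!) : Int) - (PySem.List.bisectLeft column (p.2[2]!) : Int)) -
            max (0 : Int) ((PySem.List.bisectRight column (min (p.2[1]!) (p.2[3]!)) : Int) - (PySem.List.bisectLeft column (max (p.2[0]!) (p.2[2]!)) : Int))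
            == (ticket_list.length : Int)) = true then PySem.Set.add opts p.1 else opts
      else opts)
      = (fun opts p =>
          if bTest column (ticket_list.length : Int) p = true then PySem.Set.add opts p.1 else opts) := by
    funext opts p
    rcases hp2 : p.2 with _ | ⟨a, _ | ⟨b, _ | ⟨c, _ | ⟨d, _ | t⟩⟩⟩⟩ <;>
      simp [bTest, hp2]
  rw [hbstep, foldl_add_eq_filter_map (bTest column (ticket_list.length : Int)) field_lookup
        PySem.Set.empty hnd (by intro p _; simp [PySem.Set.empty])]
  have hpoint : ∀ p ∈ field_lookup,
      (fun x => ticket_list.all fun t => !keepTest field_lookup (fv t) x) p.1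
        = bTest column (ticket_list.length : Int) p := by
    -- pointwise agreement of the two keep-tests on the dict's entries
    intro p hp
    show (ticket_list.all fun t => !keepTest field_lookup (fv t) p.1)
        = bTest column (ticket_list.length : Int) p
    have hget : (PySem.Dict.mk field_lookup).getD p.1 [] = p.2 :=
      PySem.Dict.getD_of_mem_items (PySem.Dict.mk field_lookup) hp (by rw [hkeys]; exact hnd) []
    have h4 := hlen4 p hp
    obtain ⟨a, b, c, d, hpd⟩ : ∃ a b c d, p.2 = [a, b, c, d] := by
      rcases hp2 : p.2 with _ | ⟨a, _ | ⟨b, _ | ⟨c, _ | ⟨d, _ | t⟩⟩⟩⟩ <;>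
        simp [hp2] at h4 ⊢
    have hall : (ticket_list.all fun t => !keepTest field_lookup (fv t) p.1)
        = col0.all (fun v => (decide (a ≤ v) && decide (v ≤ b)) || (decide (c ≤ v) && decide (v ≤ d))) := by
      have hfun : (fun t => !keepTest field_lookup (fv t) p.1)
          = (fun v => (decide (a ≤ v) && decide (v ≤ b)) || (decide (c ≤ v) && decide (v ≤ d))) ∘ fv := by
        funext t
        simp [keepTest, hget, hpd, Function.comp]
      rw [hcol0, List.all_map, hfun]
    have hl : col0.length = ticket_list.length := by rw [hcol0]; simp
    rw [hall, keep_eq_count a b c d col0, ← hcolumn, hl]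
    simp [bTest, hpd]
  rw [map_fst_filter_eq_filter_map_fst (bTest column (ticket_list.length : Int))
        (fun x => ticket_list.all fun t => !keepTest field_lookup (fv t) x)
        field_lookup hpoint]
  rw [← hnames]
  simp [PySem.Set.empty]
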